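-- pv_equiv track=rewrite | github.com/rutgerkool/git-metrics | src/gitsect/metrics/change_coupling.py | _extract_file_data
-- ===== SOURCE A (Python) =====
-- from collections import defaultdict
-- from typing import Dict, List, Any, Tuple, DefaultDict, Set, Optional
--
-- def _extract_file_data(commits: List[Dict[str, Any]]) -> Tuple[DefaultDict[str, int], List[List[str]]]:
--     file_changes: DefaultDict[str, int] = defaultdict(int)
--     commit_files: List[List[str]] = []
--
--     for commit in commits:
--         files_in_commit: List[str] = []
--
--         for file_change in commit["files"]:
--             filename = file_change["filename"]
--             files_in_commit.append(filename)
--             file_changes[filename] += 1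
--
--         if files_in_commit:
--             commit_files.append(files_in_commit)
--
--     return file_changes, commit_files
-- ===== SOURCE B (Python) =====
-- from collections import defaultdict
--
-- def _extract_file_data(commits):
--     commit_files = [fs for fs in
--                     ([fc["filename"] for fc in c["files"]] for c in commits)
--                     if fs]
--     flat = [f for fs in commit_files for f in fs]
--     file_changes = defaultdict(int)
--     for f in dict.fromkeys(flat):
--         file_changes[f] = flat.count(f)
--     return file_changes, commit_files
-- ===== Notes on version B (the rewrite author's own statement) =====
-- stated objective: alternative
-- what changed: B never increments per-occurrence: it extracts and filters the per-commit filename lists, flattens them, and then for each distinct filename (first-occurrence order via dict.fromkeys) computes its count in one shot with flat.count(f), instead of A's single interleaved loop that bumps a defaultdict on every file entry.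
import Mathlib
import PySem

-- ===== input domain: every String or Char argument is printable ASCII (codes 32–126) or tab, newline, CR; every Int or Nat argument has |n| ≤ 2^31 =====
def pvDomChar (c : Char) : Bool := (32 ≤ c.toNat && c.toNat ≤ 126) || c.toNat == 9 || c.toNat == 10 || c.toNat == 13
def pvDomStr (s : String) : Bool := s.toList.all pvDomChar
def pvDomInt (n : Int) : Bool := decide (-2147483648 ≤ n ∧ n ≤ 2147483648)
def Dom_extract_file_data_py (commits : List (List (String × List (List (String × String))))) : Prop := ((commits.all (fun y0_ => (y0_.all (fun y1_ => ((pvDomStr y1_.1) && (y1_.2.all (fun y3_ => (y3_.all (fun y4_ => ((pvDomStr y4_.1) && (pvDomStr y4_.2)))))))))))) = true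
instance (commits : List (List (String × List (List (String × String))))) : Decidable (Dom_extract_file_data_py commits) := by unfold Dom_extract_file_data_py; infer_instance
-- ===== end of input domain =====

-- B extracts and filters the per-commit filename lists, flattens them, and fills the
-- dict by computing flat.count(f) once per distinct filename (dict.fromkeys order);
-- A instead increments a defaultdict on every single file entry of its one nested loop.

-- ===== PORT A =====
-- A's single loop over commits; inner loop appends the filename and bumps the
-- defaultdict count.  Where Python would raise KeyError (missing "files" /
-- "filename" key) the port substitutes a default; Pre_ excludes those inputs.
def pyAInner (p : PySem.Dict String Int × List String) (file_change : List (String × String)) :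
    PySem.Dict String Int × List String :=
  let filename := ((PySem.Dict.mk file_change).get? "filename").getD ""
  (p.1.modify filename 0 (· + 1), p.2 ++ [filename])

def pyAStep (st : PySem.Dict String Int × List (List String))
    (commit : List (String × List (List (String × String)))) :
    PySem.Dict String Int × List (List String) :=
  let files := ((PySem.Dict.mk commit).get? "files").getD []
  let inner := files.foldl pyAInner (st.1, [])
  (inner.1, if inner.2.isEmpty then st.2 else st.2 ++ [inner.2])

def extract_file_data_py (commits : List (List (String × List (List (String × String))))) : (List (String × Int)) × List (List String) :=
  let st := commits.foldl pyAStep (PySem.Dict.empty, [])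
  (st.1.items, st.2)

-- ===== PORT B =====
-- B: extract + filter the per-commit lists, flatten, then one dict assignment per
-- distinct filename whose value is computed by counting it in the flattened list.
def extract_file_data_py_alt (commits : List (List (String × List (List (String × String))))) : (List (String × Int)) × List (List String) :=
  let commit_files := (commits.map (fun c =>
      (((PySem.Dict.mk c).get? "files").getD []).map
        (fun fc => ((PySem.Dict.mk fc).get? "filename").getD ""))).filter (fun fs => !fs.isEmpty)
  let flat := commit_files.flatten
  let file_changes := (PySem.List.dedup flat).foldl
      (fun d f => d.insert f ((flat.count f : Nat) : Int)) PySem.Dict.empty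
  (file_changes.items, commit_files)

-- ===== PRECONDITION & SPEC =====
-- Pre_ excludes exactly the inputs on which A raises KeyError: a commit without a
-- "files" key or a file-change entry without a "filename" key.
def Pre_extract_file_data_py (commits : List (List (String × List (List (String × String))))) : Prop :=
  ∀ commit ∈ commits,
    ((PySem.Dict.mk commit).get? "files").isSome = true ∧
    ∀ fc ∈ ((PySem.Dict.mk commit).get? "files").getD [],
      ((PySem.Dict.mk fc).get? "filename").isSome = true
instance (commits : List (List (String × List (List (String × String))))) : Decidable (Pre_extract_file_data_py commits) := by unfold Pre_extract_file_data_py; infer_instance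

def pvWitness_extract_file_data_py : (List (List (String × List (List (String × String))))) :=
  [[("files", [[("filename", "a.py")], [("filename", "b.py")]])],
   [("files", [])],
   [("files", [[("filename", "a.py")]])]]

def Spec_extract_file_data_py (commits : List (List (String × List (List (String × String))))) (out : (List (String × Int)) × List (List String)) : Prop := out = extract_file_data_py_alt commits
instance (commits : List (List (String × List (List (String × String))))) (out : (List (String × Int)) × List (List String)) : Decidable (Spec_extract_file_data_py commits out) := by unfold Spec_extract_file_data_py; infer_instance

-- ===== CLAIM (what is proved, stated in full; the proofs are below) =====
def Claim_equal_extract_file_data_py : Prop := ∀ (commits : List (List (String × List (List (String × String))))), Dom_extract_file_data_py commits → Pre_extract_file_data_py commits → Spec_extract_file_data_py commits (extract_file_data_py commits)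

-- ===== LEMMAS AND PROOFS =====

-- the filename list a commit contributes
def pvNamesOf (c : List (String × List (List (String × String)))) : List String :=
  (((PySem.Dict.mk c).get? "files").getD []).map
    (fun fc => ((PySem.Dict.mk fc).get? "filename").getD "")

-- A's inner loop computes (counter state, names) in one pass
theorem pvInner (files : List (List (String × String))) (d : PySem.Dict String Int)
    (acc : List String) :
    files.foldl pyAInner (d, acc)
    = ((files.map (fun fc => ((PySem.Dict.mk fc).get? "filename").getD "")).foldl
         (fun d f => d.modify f 0 (· + 1)) d,
       acc ++ files.map (fun fc => ((PySem.Dict.mk fc).get? "filename").getD "")) := by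
  induction files generalizing d acc with
  | nil => simp
  | cons fc rest ih => simp [List.foldl_cons, pyAInner, ih]

-- one step of A's outer loop
theorem pvStep (d : PySem.Dict String Int) (cf : List (List String))
    (c : List (String × List (List (String × String)))) :
    pyAStep (d, cf) c
    = ((pvNamesOf c).foldl (fun d f => d.modify f 0 (· + 1)) d,
       if (pvNamesOf c).isEmpty then cf else cf ++ [pvNamesOf c]) := by
  simp [pyAStep, pvInner, pvNamesOf]

-- A's outer loop, characterised for an arbitrary starting state
theorem pvOuter (commits : List (List (String × List (List (String × String)))))
    (d : PySem.Dict String Int) (cf : List (List String)) :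
    commits.foldl pyAStep (d, cf)
    = ((commits.map pvNamesOf).flatten.foldl (fun d f => d.modify f 0 (· + 1)) d,
       cf ++ (commits.map pvNamesOf).filter (fun fs => !fs.isEmpty)) := by
  induction commits generalizing d cf with
  | nil => simp
  | cons c rest ih =>
    rw [List.foldl_cons, pvStep, ih]
    simp only [List.map_cons, List.flatten_cons, List.filter_cons, List.foldl_append]
    by_cases h : (pvNamesOf c).isEmpty <;> simp [h]

-- dropping the empty inner lists does not change the flattened list
theorem pvFlattenFilter (L : List (List String)) :
    (L.filter (fun fs => !fs.isEmpty)).flatten = L.flatten := by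
  induction L with
  | nil => rfl
  | cons a rest ih =>
    by_cases h : a.isEmpty
    · simp [ih, List.isEmpty_iff.mp h]
    · simp [h, ih]

-- B's insert loop over the distinct filenames yields exactly Counter(flat).items
theorem pvBItems (flat : List String) :
    ((PySem.List.dedup flat).foldl
        (fun d f => d.insert f ((flat.count f : Nat) : Int)) PySem.Dict.empty).items
    = (PySem.Dict.counter flat).items := by
  have h := PySem.Dict.items_foldl_insert_fresh (l := PySem.List.dedup flat) (k := id)
      (v := fun f => ((flat.count f : Nat) : Int)) (d := PySem.Dict.empty)
      (fun a _ => PySem.Dict.contains_empty a)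
      (by simp)
  simp only [id] at h
  rw [PySem.Dict.items_counter, h]
  simp [PySem.List.dedup_eq_ofList, PySem.Dict.empty]

-- ===== VERDICT (by name: the statement is the Claim_ definition above) =====
theorem extract_file_data_py_spec : Claim_equal_extract_file_data_py := by
  intro commits _ _
  show extract_file_data_py commits = extract_file_data_py_alt commits
  simp only [extract_file_data_py, extract_file_data_py_alt, pvOuter, List.nil_append]
  refine Prod.ext ?_ rfl
  rw [pvBItems, PySem.Dict.counter_eq_foldl]
  rw [show (commits.map pvNamesOf) = commits.map (fun c =>
      (((PySem.Dict.mk c).get? "files").getD []).map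
        (fun fc => ((PySem.Dict.mk fc).get? "filename").getD "")) from rfl]
  rw [pvFlattenFilter]
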